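-- pv_equiv track=rewrite | github.com/skailasa/practice | ctc/hard/4-missing-number.py | count
-- ===== SOURCE A (Python) =====
-- def count(l, shift=0):
--     c = {0: 0, 1: 0}
--
--     for n in l:
--         if bin(n >> shift)[-1] == '0':
--             c[0] += 1
--         elif bin(n >> shift)[-1] == '1':
--             c[1] += 1
--
--     return c
-- ===== SOURCE B (Python) =====
-- def count(l, shift=0):
--     # divide-and-conquer: recursively split the list in halves, count (zeros, ones)
--     # of the shifted low bit in each half, and combine by addition
--     def go(xs):
--         if not xs:
--             return (0, 0)
--         if len(xs) == 1:
--             b = (xs[0] >> shift) % 2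
--             return (1 - b, b)
--         m = len(xs) // 2
--         z1, o1 = go(xs[:m])
--         z2, o2 = go(xs[m:])
--         return (z1 + z2, o1 + o2)
--     z, o = go(list(l))
--     return {0: z, 1: o}
-- ===== Notes on version B (the rewrite author's own statement) =====
-- stated objective: alternative
-- what changed: Replaces A's sequential loop over a dict of two counters (testing the bit by building a binary string per element) with a recursive divide-and-conquer that splits the list in halves, counts (zeros, ones) of the shifted low bit in each half with an arithmetic test, and combines the pair sums, building the dict once at the end.
import Mathlib
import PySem

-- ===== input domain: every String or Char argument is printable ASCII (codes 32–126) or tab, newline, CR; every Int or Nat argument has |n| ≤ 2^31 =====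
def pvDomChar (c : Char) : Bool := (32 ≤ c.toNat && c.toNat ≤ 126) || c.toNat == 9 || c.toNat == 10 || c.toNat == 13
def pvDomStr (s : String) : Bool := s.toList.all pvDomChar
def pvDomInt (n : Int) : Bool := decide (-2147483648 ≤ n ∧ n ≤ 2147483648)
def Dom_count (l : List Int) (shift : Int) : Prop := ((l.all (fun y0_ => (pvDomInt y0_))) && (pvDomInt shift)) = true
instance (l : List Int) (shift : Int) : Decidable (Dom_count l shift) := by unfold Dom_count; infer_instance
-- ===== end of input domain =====

-- B replaces A's sequential dict-of-two-counters loop (bit tested via a binary-string round-trip)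
-- by a recursive divide-and-conquer over list halves combining (zeros, ones) pairs arithmetically.

-- ===== PORT A =====
-- hand port of the last character of Python's bin(m): it is the least-significant
-- binary digit of |m| (bin prefixes '-' for negatives and writes the digits of |m|); exact.
def binLast (m : Int) : Char := if m.natAbs % 2 == 0 then '0' else '1'

def count (l : List Int) (shift : Int) : List (Int × Int) :=
  let c : PySem.Dict Int Int := (PySem.Dict.empty.insert 0 0).insert 1 0
  let c := l.foldl (fun c (n : Int) =>
    if binLast (n >>> shift.toNat) == '0' then c.modify 0 0 (· + 1)
    else if binLast (n >>> shift.toNat) == '1' then c.modify 1 0 (· + 1)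
    else c) c
  c.items

-- ===== PORT B =====
-- the inner recursive 'go': split in halves, count (zeros, ones) of the shifted low bit
def goCount (shift : Nat) (xs : List Int) : Int × Int :=
  if xs = [] then (0, 0)
  else if xs.length = 1 then
    let b := PySem.Int.mod (xs.headI >>> shift) 2
    (1 - b, b)
  else
    let m := xs.length / 2
    let p1 := goCount shift (xs.take m)
    let p2 := goCount shift (xs.drop m)
    (p1.1 + p2.1, p1.2 + p2.2)
termination_by xs.length
decreasing_by
  all_goals
    rename_i hne h1
    have h0 : xs.length ≠ 0 := by simpa [List.length_eq_zero_iff] using hne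
    simp [List.length_take, List.length_drop]
    omega

def count_alt (l : List Int) (shift : Int) : List (Int × Int) :=
  let p := goCount shift.toNat l
  [(0, p.1), (1, p.2)]

-- ===== PRECONDITION & SPEC =====
-- Pre_ excludes only inputs where Python A raises: a negative shift with a nonempty list
-- makes 'n >> shift' raise ValueError (B raises there too).
def Pre_count (l : List Int) (shift : Int) : Prop := l = [] ∨ 0 ≤ shift
instance (l : List Int) (shift : Int) : Decidable (Pre_count l shift) := by unfold Pre_count; infer_instance
def pvWitness_count : List Int × Int := ([3, -4, 7], 1)
def Spec_count (l : List Int) (shift : Int) (out : List (Int × Int)) : Prop := out = count_alt l shift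
instance (l : List Int) (shift : Int) (out : List (Int × Int)) : Decidable (Spec_count l shift out) := by unfold Spec_count; infer_instance

-- ===== CLAIM =====
def Claim_equal_count : Prop := ∀ (l : List Int) (shift : Int), Dom_count l shift → Pre_count l shift → Spec_count l shift (count l shift)

-- ===== LEMMAS AND PROOFS =====

theorem mod_two_cases (m : Int) : PySem.Int.mod m 2 = 0 ∨ PySem.Int.mod m 2 = 1 := by
  rw [PySem.Int.mod_eq_emod_of_pos (by omega : (0:Int) < 2)]; omega

theorem binLast_of_mod_zero (m : Int) (h : PySem.Int.mod m 2 = 0) : binLast m = '0' := by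
  rw [PySem.Int.mod_eq_emod_of_pos (by omega : (0:Int) < 2)] at h
  unfold binLast; rw [if_pos]; simp; omega

theorem binLast_of_mod_one (m : Int) (h : PySem.Int.mod m 2 = 1) : binLast m = '1' := by
  rw [PySem.Int.mod_eq_emod_of_pos (by omega : (0:Int) < 2)] at h
  unfold binLast; rw [if_neg]; simp; omega

-- loop invariant for A's dict fold, expressed via the bit sum and the length.
theorem fold_invariant (s : Nat) (l : List Int) (z o : Int) :
    (l.foldl (fun c (n : Int) =>
      if binLast (n >>> s) == '0' then c.modify 0 0 (· + 1)
      else if binLast (n >>> s) == '1' then c.modify 1 0 (· + 1)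
      else c) (PySem.Dict.mk [((0:Int), z), (1, o)])) =
    PySem.Dict.mk [(0, z + ((l.length : Int) - (l.map (fun (n : Int) => PySem.Int.mod (n >>> s) 2)).sum)),
                   (1, o + (l.map (fun (n : Int) => PySem.Int.mod (n >>> s) 2)).sum)] := by
  induction l generalizing z o with
  | nil => simp
  | cons n t ih =>
    simp only [List.foldl_cons, List.map_cons, List.sum_cons, List.length_cons]
    rcases mod_two_cases (n >>> s) with h | h
    · rw [h, binLast_of_mod_zero _ h]
      refine Eq.trans ?_ ((ih (z + 1) o).trans ?_)
      · rfl
      · simp only [PySem.Dict.mk.injEq, List.cons.injEq, Prod.mk.injEq, and_true, true_and]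
        push_cast; omega
    · rw [h, binLast_of_mod_one _ h]
      refine Eq.trans ?_ ((ih z (o + 1)).trans ?_)
      · rfl
      · simp only [PySem.Dict.mk.injEq, List.cons.injEq, Prod.mk.injEq, and_true, true_and]
        push_cast; omega

-- B's divide-and-conquer computes (length - bit sum, bit sum).
theorem goCount_eq (s : Nat) (xs : List Int) :
    goCount s xs = ((xs.length : Int) - (xs.map (fun (n : Int) => PySem.Int.mod (n >>> s) 2)).sum,
                    (xs.map (fun (n : Int) => PySem.Int.mod (n >>> s) 2)).sum) := by
  induction xs using goCount.induct s with
  | case1 => simp [goCount]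
  | case2 xs hne h1 =>
    obtain ⟨a, rfl⟩ := List.length_eq_one_iff.mp h1
    simp [goCount]
  | case3 xs hne h1 m ih1 ih2 =>
    rw [goCount]
    simp only [if_neg hne, if_neg h1]
    rw [ih1, ih2]
    have := List.take_append_drop (xs.length / 2) xs
    have hlen : (xs.take (xs.length / 2)).length + (xs.drop (xs.length / 2)).length = xs.length := by
      simp; omega
    have hsum : ((xs.take (xs.length / 2)).map (fun (n : Int) => PySem.Int.mod (n >>> s) 2)).sum +
        ((xs.drop (xs.length / 2)).map (fun (n : Int) => PySem.Int.mod (n >>> s) 2)).sum =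
        (xs.map (fun (n : Int) => PySem.Int.mod (n >>> s) 2)).sum := by
      conv_rhs => rw [← List.take_append_drop (xs.length / 2) xs]
      simp
    have hm : m = xs.length / 2 := rfl
    refine Prod.ext ?_ ?_ <;> simp only [hm] <;> omega

-- ===== VERDICT =====
theorem count_spec : Claim_equal_count := by
  intro l shift _ _
  unfold Spec_count
  simp only [count, count_alt]
  rw [goCount_eq]
  change (List.foldl _ (PySem.Dict.mk [((0:Int), (0:Int)), (1, 0)]) l).items = _
  rw [fold_invariant]
  simp
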